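-- pv_equiv track=rewrite | github.com/medinardaniel/photos-rag | photos-rag-backend/app/relationships.py | describe_relationships
-- ===== SOURCE A (Python) =====
-- def describe_relationships(image_description):
--     """
--     Describes the relationships among the individuals in the image.
--     Input: image_description--A string containing the image description.
--     Return: A string that describes the relationships among the individuals in the image.
--     """
--     relationships = []
--
--     # Married
--     if "Juan" in image_description and "Graciela" in image_description:
--         relationships.append("Juan and Graciela are married.")
--
--     # Grandmother
--     grandchildren = ["Daniel", "Pipe", "Santiago"]
--     for grandchild in grandchildren:
--         if "Kika" in image_description and grandchild in image_description:
--             relationships.append(f"Kika is {grandchild}'s grandmother.")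
--
--     # Kika and Tia Angie are friends
--     if "Kika" in image_description and "Tia Angie" in image_description:
--         relationships.append("Kika and Tia Angie are friends.")
--
--     # Kika is Tia Icha's mother
--     if "Kika" in image_description and "Tia Icha" in image_description:
--         relationships.append("Kika is Tia Icha's mother.")
--
--     # Brothers
--     brothers = ["Daniel", "Santiago", "Pipe"]
--     for i, brother1 in enumerate(brothers):
--         for brother2 in brothers[i+1:]:
--             if brother1 in image_description and brother2 in image_description:
--                 relationships.append(f"{brother1} and {brother2} are brothers.")
--
--     # Daniel's Friends
--     daniels_friends = ["Julio", "Javier", "Will", "Pablo", "Azul", "Sri"]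
--     for friend in daniels_friends:
--         if "Daniel" in image_description and friend in image_description:
--             relationships.append(f"Daniel and {friend} are friends.")
--
--     # General Friendship among Julio, Javier, Will, Pablo, Santiago, and Azul
--     friends = ["Julio", "Javier", "Will", "Pablo", "Santiago", "Azul"]
--     for i, friend1 in enumerate(friends):
--         for friend2 in friends[i+1:]:
--             if friend1 in image_description and friend2 in image_description:
--                 relationships.append(f"{friend1} and {friend2} are friends.")
--
--     return " ".join(relationships)
-- ===== SOURCE B (Python) =====
-- def _pairs(names, fmt):
--     return [([a, b], fmt % (a, b)) for i, a in enumerate(names) for b in names[i + 1:]]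
--
-- _RULES = (
--     [(["Juan", "Graciela"], "Juan and Graciela are married.")]
--     + [(["Kika", g], "Kika is %s's grandmother." % g) for g in ["Daniel", "Pipe", "Santiago"]]
--     + [(["Kika", "Tia Angie"], "Kika and Tia Angie are friends.")]
--     + [(["Kika", "Tia Icha"], "Kika is Tia Icha's mother.")]
--     + _pairs(["Daniel", "Santiago", "Pipe"], "%s and %s are brothers.")
--     + [(["Daniel", f], "Daniel and %s are friends." % f) for f in ["Julio", "Javier", "Will", "Pablo", "Azul", "Sri"]]
--     + _pairs(["Julio", "Javier", "Will", "Pablo", "Santiago", "Azul"], "%s and %s are friends.")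
-- )
--
-- def describe_relationships(image_description):
--     return " ".join(s for names, s in _RULES
--                     if all(n in image_description for n in names))
-- ===== Notes on version B (the rewrite author's own statement) =====
-- stated objective: simpler
-- what changed: A's sequence of hard-coded if-blocks and nested loops is replaced by a declarative ordered rules table (required-names list + sentence, with pairwise group rules expanded by one helper) filtered by a single driver pass that joins the matching sentences.
import Mathlib
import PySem

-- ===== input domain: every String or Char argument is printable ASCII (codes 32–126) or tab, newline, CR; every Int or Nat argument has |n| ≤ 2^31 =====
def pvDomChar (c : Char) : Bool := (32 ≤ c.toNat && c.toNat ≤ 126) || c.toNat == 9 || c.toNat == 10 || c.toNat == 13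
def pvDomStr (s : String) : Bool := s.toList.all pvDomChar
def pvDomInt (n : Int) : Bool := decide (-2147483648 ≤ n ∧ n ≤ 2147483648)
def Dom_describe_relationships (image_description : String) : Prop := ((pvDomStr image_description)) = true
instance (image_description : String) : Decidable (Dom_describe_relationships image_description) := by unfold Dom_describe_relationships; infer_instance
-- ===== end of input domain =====

-- B replaces A's sequence of if-blocks and nested loops by one declarative rules table
-- (required-names list + sentence) filtered in one pass; objective: simpler, same cost.

-- ===== PORT A =====
def describe_relationships (image_description : String) : String :=
  let relationships : List String := []
  let relationships :=
    if PySem.Str.isIn "Juan" image_description && PySem.Str.isIn "Graciela" image_description then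
      relationships ++ ["Juan and Graciela are married."] else relationships
  let grandchildren : List String := ["Daniel", "Pipe", "Santiago"]
  let relationships := grandchildren.foldl (fun acc grandchild =>
    if PySem.Str.isIn "Kika" image_description && PySem.Str.isIn grandchild image_description then
      acc ++ ["Kika is " ++ grandchild ++ "'s grandmother."] else acc) relationships
  let relationships :=
    if PySem.Str.isIn "Kika" image_description && PySem.Str.isIn "Tia Angie" image_description then
      relationships ++ ["Kika and Tia Angie are friends."] else relationships
  let relationships :=
    if PySem.Str.isIn "Kika" image_description && PySem.Str.isIn "Tia Icha" image_description then
      relationships ++ ["Kika is Tia Icha's mother."] else relationships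
  let brothers : List String := ["Daniel", "Santiago", "Pipe"]
  let relationships := (PySem.List.enumerate brothers 0).foldl (fun acc p =>
    (PySem.List.slice brothers (some (p.1 + 1)) none).foldl (fun acc brother2 =>
      if PySem.Str.isIn p.2 image_description && PySem.Str.isIn brother2 image_description then
        acc ++ [p.2 ++ " and " ++ brother2 ++ " are brothers."] else acc) acc) relationships
  let daniels_friends : List String := ["Julio", "Javier", "Will", "Pablo", "Azul", "Sri"]
  let relationships := daniels_friends.foldl (fun acc friend =>
    if PySem.Str.isIn "Daniel" image_description && PySem.Str.isIn friend image_description then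
      acc ++ ["Daniel and " ++ friend ++ " are friends."] else acc) relationships
  let friends : List String := ["Julio", "Javier", "Will", "Pablo", "Santiago", "Azul"]
  let relationships := (PySem.List.enumerate friends 0).foldl (fun acc p =>
    (PySem.List.slice friends (some (p.1 + 1)) none).foldl (fun acc friend2 =>
      if PySem.Str.isIn p.2 image_description && PySem.Str.isIn friend2 image_description then
        acc ++ [p.2 ++ " and " ++ friend2 ++ " are friends."] else acc) acc) relationships
  PySem.Str.join " " relationships

-- ===== PORT B =====
-- _pairs(names, fmt): all ordered pairs (names[i], names[j]) with i < j, with their sentences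
def pvPairs (names : List String) (fmt : String → String → String) : List (List String × String) :=
  (PySem.List.enumerate names 0).flatMap (fun p =>
    (PySem.List.slice names (some (p.1 + 1)) none).map (fun b => ([p.2, b], fmt p.2 b)))

-- _RULES: the ordered table of (required names, sentence)
def pvRules : List (List String × String) :=
  [(["Juan", "Graciela"], "Juan and Graciela are married.")]
  ++ (["Daniel", "Pipe", "Santiago"].map (fun g => (["Kika", g], "Kika is " ++ g ++ "'s grandmother.")))
  ++ [(["Kika", "Tia Angie"], "Kika and Tia Angie are friends.")]
  ++ [(["Kika", "Tia Icha"], "Kika is Tia Icha's mother.")]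
  ++ pvPairs ["Daniel", "Santiago", "Pipe"] (fun a b => a ++ " and " ++ b ++ " are brothers.")
  ++ (["Julio", "Javier", "Will", "Pablo", "Azul", "Sri"].map (fun f => (["Daniel", f], "Daniel and " ++ f ++ " are friends.")))
  ++ pvPairs ["Julio", "Javier", "Will", "Pablo", "Santiago", "Azul"] (fun a b => a ++ " and " ++ b ++ " are friends.")

def describe_relationships_alt (image_description : String) : String :=
  PySem.Str.join " "
    ((pvRules.filter (fun r => r.1.all (fun n => PySem.Str.isIn n image_description))).map (·.2))

-- ===== PRECONDITION & SPEC =====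
def Spec_describe_relationships (image_description : String) (out : String) : Prop := out = describe_relationships_alt image_description
instance (image_description : String) (out : String) : Decidable (Spec_describe_relationships image_description out) := by unfold Spec_describe_relationships; infer_instance

-- ===== CLAIM (what is proved, stated in full; the proofs are below) =====
def Claim_equal_describe_relationships : Prop := ∀ (image_description : String), Dom_describe_relationships image_description → Spec_describe_relationships image_description (describe_relationships image_description)

-- ===== LEMMAS AND PROOFS =====

theorem pv_map_filter {α β : Type} (p : α → Bool) (f : α → β) (l : List α) :
    (l.filter p).map f = l.flatMap (fun x => if p x then [f x] else []) := by
  induction l with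
  | nil => rfl
  | cons h t ih => cases hp : p h <;> simp [hp, ih]

theorem pv_app_if {α : Type} (t : Bool) (acc l : List α) :
    (if t = true then acc ++ l else acc) = acc ++ (if t = true then l else []) := by
  cases t <;> simp

theorem lists_eq (c : String → Bool) :
    ((pvRules.filter (fun r => r.1.all c)).map (·.2)) =
    (let relationships : List String := []
     let relationships :=
       if c "Juan" && c "Graciela" then relationships ++ ["Juan and Graciela are married."] else relationships
     let grandchildren : List String := ["Daniel", "Pipe", "Santiago"]
     let relationships := grandchildren.foldl (fun acc grandchild =>
       if c "Kika" && c grandchild then acc ++ ["Kika is " ++ grandchild ++ "'s grandmother."] else acc) relationships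
     let relationships :=
       if c "Kika" && c "Tia Angie" then relationships ++ ["Kika and Tia Angie are friends."] else relationships
     let relationships :=
       if c "Kika" && c "Tia Icha" then relationships ++ ["Kika is Tia Icha's mother."] else relationships
     let brothers : List String := ["Daniel", "Santiago", "Pipe"]
     let relationships := (PySem.List.enumerate brothers 0).foldl (fun acc p =>
       (PySem.List.slice brothers (some (p.1 + 1)) none).foldl (fun acc brother2 =>
         if c p.2 && c brother2 then acc ++ [p.2 ++ " and " ++ brother2 ++ " are brothers."] else acc) acc) relationships
     let daniels_friends : List String := ["Julio", "Javier", "Will", "Pablo", "Azul", "Sri"]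
     let relationships := daniels_friends.foldl (fun acc friend =>
       if c "Daniel" && c friend then acc ++ ["Daniel and " ++ friend ++ " are friends."] else acc) relationships
     let friends : List String := ["Julio", "Javier", "Will", "Pablo", "Santiago", "Azul"]
     let relationships := (PySem.List.enumerate friends 0).foldl (fun acc p =>
       (PySem.List.slice friends (some (p.1 + 1)) none).foldl (fun acc friend2 =>
         if c p.2 && c friend2 then acc ++ [p.2 ++ " and " ++ friend2 ++ " are friends."] else acc) acc) relationships
     relationships) := by
  simp only [pvRules, pvPairs, pv_app_if, PySem.List.foldl_append_eq_flatMap,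
    List.filter_append, List.map_append,
    pv_map_filter, List.map_cons, List.map_nil, List.flatMap_cons, List.flatMap_nil,
    List.flatMap_map, List.flatMap_assoc, List.all_cons, List.all_nil,
    Bool.and_true]
  simp only [List.append_assoc, List.nil_append, List.append_nil]


theorem describe_relationships_spec : Claim_equal_describe_relationships := by
  intro d _
  show describe_relationships d = describe_relationships_alt d
  unfold describe_relationships describe_relationships_alt
  exact (congrArg (PySem.Str.join " ") (lists_eq (fun n => PySem.Str.isIn n d))).symm
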